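-- pv_equiv track=rewrite | github.com/pypi-data/pypi-mirror-173 | packages/tkinterplus/tkinterplus-1.0.2.tar.gz/tkinterplus-1.0.2/tkinterplus/experimental_widgets/canvas3d.py | _get_faces
-- ===== SOURCE A (Python) =====
-- class CanvasError(Exception): pass
--
-- def _get_faces(faces):
--     """Returns with each side of the face in a tuple (north, south, east, west, top, bottom)"""
--     max_index = len(faces)
--     if max_index <= 6:
--         f = []
--         for i in range(7):
--             try: f.append(faces[i])
--             except IndexError: f.append(faces[max_index-1])
--         return f[0], f[1], f[2], f[3], f[4], f[5]
--     else: raise CanvasError('Too many faces. expected 1-6')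
-- ===== SOURCE B (Python) =====
-- class CanvasError(Exception): pass
--
-- def _get_faces(faces):
--     """Returns with each side of the face in a tuple (north, south, east, west, top, bottom)"""
--     n = len(faces)
--     if n > 6:
--         raise CanvasError('Too many faces. expected 1-6')
--     head = list(faces[:6])
--     return tuple(head + [faces[n - 1]] * (6 - len(head)))
-- ===== Notes on version B (the rewrite author's own statement) =====
-- stated objective: simpler
-- what changed: Replaces A's 7-iteration try/except bounds-probing loop with a single slice faces[:6] plus an arithmetically computed pad count of the last element.
import Mathlib
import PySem

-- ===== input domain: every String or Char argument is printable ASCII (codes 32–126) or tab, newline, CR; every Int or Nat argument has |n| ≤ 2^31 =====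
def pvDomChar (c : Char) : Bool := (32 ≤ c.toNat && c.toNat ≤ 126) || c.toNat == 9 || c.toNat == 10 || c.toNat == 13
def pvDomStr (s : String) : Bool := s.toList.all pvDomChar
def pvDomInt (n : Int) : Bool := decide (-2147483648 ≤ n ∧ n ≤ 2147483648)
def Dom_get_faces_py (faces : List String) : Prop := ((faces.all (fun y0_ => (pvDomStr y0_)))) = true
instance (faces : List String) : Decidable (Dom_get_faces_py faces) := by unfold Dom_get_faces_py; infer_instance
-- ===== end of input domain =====

-- B replaces A's 7-iteration try/except padding loop by a slice plus an arithmetic pad count (simpler decomposition).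

-- ===== PORT A =====
-- literal port of A: for i in range(7): try append faces[i]; on IndexError append faces[max_index-1];
-- 'try faces[i] except IndexError: fallback' is pyGetD faces i fallback (exact: pyGetD returns the
-- fallback exactly when the index raises IndexError); the inner fallback's own default "" is only
-- reachable when faces = [], where Python raises IndexError (excluded by Pre_).
def get_faces_py (faces : List String) : List String :=
  let max_index : Int := faces.length
  let f : List String :=
    (PySem.List.pyRange 0 7 1).foldl (fun f i =>
      f ++ [PySem.List.pyGetD faces i (PySem.List.pyGetD faces (max_index - 1) "")]) []
  -- return f[0], f[1], f[2], f[3], f[4], f[5]  (f always has 7 elements, so the defaults never fire)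
  [(PySem.List.pyGetD f 0 ""), (PySem.List.pyGetD f 1 ""),
   (PySem.List.pyGetD f 2 ""), (PySem.List.pyGetD f 3 ""),
   (PySem.List.pyGetD f 4 ""), (PySem.List.pyGetD f 5 "")]

-- ===== PORT B =====
-- head = list(faces[:6]); head + [faces[n-1]] * (6 - len(head)); faces[n-1]'s default "" is only
-- reachable when faces = [], where Python raises IndexError (excluded by Pre_).
def get_faces_py_alt (faces : List String) : List String :=
  let n : Int := faces.length
  let head := PySem.List.slice faces (some 0) (some 6)
  head ++ List.replicate (6 - head.length) (PySem.List.pyGetD faces (n - 1) "")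

-- ===== PRECONDITION & SPEC =====
-- Pre_ excludes [] (A raises IndexError via faces[max_index-1]) and lists of more than 6 faces
-- (A raises CanvasError('Too many faces. expected 1-6')); B raises the same exceptions there.
def Pre_get_faces_py (faces : List String) : Prop := 1 ≤ faces.length ∧ faces.length ≤ 6
instance (faces : List String) : Decidable (Pre_get_faces_py faces) := by unfold Pre_get_faces_py; infer_instance
def pvWitness_get_faces_py : List String := ["n", "s"]
def Spec_get_faces_py (faces : List String) (out : List String) : Prop := out = get_faces_py_alt faces
instance (faces : List String) (out : List String) : Decidable (Spec_get_faces_py faces out) := by unfold Spec_get_faces_py; infer_instance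

-- ===== CLAIM (what is proved, stated in full; the proofs are below) =====
def Claim_equal_get_faces_py : Prop := ∀ (faces : List String), Dom_get_faces_py faces → Pre_get_faces_py faces → Spec_get_faces_py faces (get_faces_py faces)

-- ===== LEMMAS AND PROOFS =====
theorem pvRange07 : PySem.List.pyRange 0 7 1 = [0, 1, 2, 3, 4, 5, 6] := by
  rw [PySem.List.pyRange_one]; decide

-- ===== VERDICT (by name: the statement is the Claim_ definition above) =====
theorem get_faces_py_spec : Claim_equal_get_faces_py := by
  intro faces _ hpre
  unfold Spec_get_faces_py
  obtain ⟨h1, h6⟩ := hpre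
  match faces with
  | [] => simp at h1
  | [a] =>
    simp only [get_faces_py, get_faces_py_alt, pvRange07, List.foldl,
      PySem.List.pyGetD_ofNat', List.nil_append]
    simp [PySem.List.slice, PySem.List.clampIdx, List.getD]
  | [a, b] =>
    simp only [get_faces_py, get_faces_py_alt, pvRange07, List.foldl,
      PySem.List.pyGetD_ofNat', List.nil_append]
    simp [PySem.List.slice, PySem.List.clampIdx, List.getD]
  | [a, b, c] =>
    simp only [get_faces_py, get_faces_py_alt, pvRange07, List.foldl,
      PySem.List.pyGetD_ofNat', List.nil_append]
    simp [PySem.List.slice, PySem.List.clampIdx, List.getD]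
  | [a, b, c, d] =>
    simp only [get_faces_py, get_faces_py_alt, pvRange07, List.foldl,
      PySem.List.pyGetD_ofNat', List.nil_append]
    simp [PySem.List.slice, PySem.List.clampIdx, List.getD]
  | [a, b, c, d, e] =>
    simp only [get_faces_py, get_faces_py_alt, pvRange07, List.foldl,
      PySem.List.pyGetD_ofNat', List.nil_append]
    simp [PySem.List.slice, PySem.List.clampIdx, List.getD]
  | [a, b, c, d, e, f] =>
    simp only [get_faces_py, get_faces_py_alt, pvRange07, List.foldl,
      PySem.List.pyGetD_ofNat', List.nil_append]
    simp [PySem.List.slice, PySem.List.clampIdx, List.getD]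
  | a :: b :: c :: d :: e :: f :: g :: t =>
    simp [List.length] at h6; omega
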